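-- pv_equiv track=rewrite | github.com/QianyuyuGitHub/dataProcess | ComputerVision/littleHM.py | get_minimal_data_range
-- ===== SOURCE A (Python) =====
-- def get_minimal_data_range(data_list):
--     '''
--     Get the minimal data list (smaller than 1000)
--
--     :param data_list:
--     :return:
--     '''
--     minimal_list_length = len(data_list[0])
--     minimal_list = []
--     for i in range(minimal_list_length):
--         minimal_list.append(1000)
--     for point_data_pair in data_list:
--         for index, item_single in enumerate(point_data_pair):
--             if minimal_list[index] > item_single:
--                 minimal_list[index] = item_single
--     return minimal_list
-- ===== SOURCE B (Python) =====
-- def get_minimal_data_range(data_list):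
--     n = len(data_list[0])
--     return [min([1000] + [row[i] for row in data_list if i < len(row)])
--             for i in range(n)]
-- ===== Notes on version B (the rewrite author's own statement) =====
-- stated objective: idiomatic
-- what changed: Replaces the row-major running-minimum list that A mutates across successive row scans with a column-wise comprehension: for each index i it gathers the i-th entries of all rows and reduces them with min together with the 1000 cap.
import Mathlib
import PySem

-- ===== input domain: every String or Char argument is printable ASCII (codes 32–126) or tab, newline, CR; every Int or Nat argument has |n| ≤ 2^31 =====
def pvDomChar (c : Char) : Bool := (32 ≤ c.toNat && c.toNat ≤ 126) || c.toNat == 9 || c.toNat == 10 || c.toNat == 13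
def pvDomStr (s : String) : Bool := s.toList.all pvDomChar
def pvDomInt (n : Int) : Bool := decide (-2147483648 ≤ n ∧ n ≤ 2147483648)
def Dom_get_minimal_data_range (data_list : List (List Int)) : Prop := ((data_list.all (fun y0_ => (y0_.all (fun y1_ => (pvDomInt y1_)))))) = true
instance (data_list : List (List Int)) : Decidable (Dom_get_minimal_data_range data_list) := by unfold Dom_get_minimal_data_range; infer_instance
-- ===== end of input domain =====

-- B computes each column's capped minimum directly (gather the i-th entries, reduce with min)
-- instead of A's running-minimum list mutated across successive row scans; objective: idiomatic.


-- ===== PORT A =====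
-- literal transliteration: build [1000]*n by appending in a loop, then for each row,
-- for (index, item) in enumerate(row): if minimal_list[index] > item: minimal_list[index] = item
-- (minimal_list[index] via pyGet?: none = IndexError, excluded by Pre_)
def get_minimal_data_range (data_list : List (List Int)) : List Int :=
  let minimal_list_length := ((PySem.List.pyGet? data_list 0).getD []).length
  let minimal_list :=
    (PySem.List.pyRange 0 (minimal_list_length : Int) 1).foldl
      (fun acc _ => acc ++ [(1000 : Int)]) []
  data_list.foldl
    (fun ml point_data_pair =>
      (PySem.List.enumerate point_data_pair).foldl
        (fun ml p =>
          match PySem.List.pyGet? ml p.1 with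
          | some v => if v > p.2 then ml.set p.1.toNat p.2 else ml
          | none => ml)
        ml)
    minimal_list

-- ===== PORT B =====
-- literal transliteration of Source B: n = len(data_list[0]);
-- [min([1000] + [row[i] for row in data_list if i < len(row)]) for i in range(n)]
def get_minimal_data_range_alt (data_list : List (List Int)) : List Int :=
  let n := ((PySem.List.pyGet? data_list 0).getD []).length
  (List.range n).map
    (fun i => (data_list.filterMap (fun row => row[i]?)).foldl min (1000 : Int))

-- ===== PRECONDITION & SPEC =====
-- Pre_ excludes exactly the inputs where A raises IndexError: the empty list
-- (data_list[0]) and inputs where some row is longer than the first (minimal_list[index]).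
def Pre_get_minimal_data_range (data_list : List (List Int)) : Prop :=
  data_list ≠ [] ∧ ∀ row ∈ data_list, row.length ≤ (data_list.headD []).length
instance (data_list : List (List Int)) : Decidable (Pre_get_minimal_data_range data_list) := by unfold Pre_get_minimal_data_range; infer_instance
def pvWitness_get_minimal_data_range : List (List Int) := [[1, 2000], [3, 4]]

def Spec_get_minimal_data_range (data_list : List (List Int)) (out : List Int) : Prop := out = get_minimal_data_range_alt data_list
instance (data_list : List (List Int)) (out : List Int) : Decidable (Spec_get_minimal_data_range data_list out) := by unfold Spec_get_minimal_data_range; infer_instance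

-- ===== CLAIM (what is proved, stated in full; the proofs are below) =====
def Claim_equal_get_minimal_data_range : Prop := ∀ (data_list : List (List Int)), Dom_get_minimal_data_range data_list → Pre_get_minimal_data_range data_list → Spec_get_minimal_data_range data_list (get_minimal_data_range data_list)

-- ===== LEMMAS AND PROOFS =====

-- A's inner loop over enumerate(row, s): takes elementwise min at positions s..s+row.length-1.
lemma inner_spec (row : List Int) : ∀ (ml : List Int) (s : Nat),
    s + row.length ≤ ml.length →
    (PySem.List.enumerate row (s : Int)).foldl
        (fun ml p =>
          match PySem.List.pyGet? ml p.1 with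
          | some v => if v > p.2 then ml.set p.1.toNat p.2 else ml
          | none => ml) ml
      = ml.mapIdx (fun k v =>
          if s ≤ k ∧ k < s + row.length then min v (row.getD (k - s) 0) else v) := by
  induction row with
  | nil =>
      intro ml s h
      simp only [List.length_nil, Nat.add_zero, PySem.List.enumerate, List.foldl_nil]
      apply List.ext_getElem <;> simp [List.getElem_mapIdx]
  | cons a as ih =>
      intro ml s h
      rw [PySem.List.enumerate_cons]
      have hs : (s : Int) + 1 = ((s + 1 : Nat) : Int) := by push_cast; ring
      have hlen : s < ml.length := by simp at h; omega
      have hget : PySem.List.pyGet? ml (s : Int) = some ml[s] := by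
        rw [PySem.List.pyGet?_natCast]; exact List.getElem?_eq_getElem hlen
      have hstep :
          (match PySem.List.pyGet? ml ((s : Int), a).1 with
            | some v => if v > ((s : Int), a).2 then ml.set ((s : Int), a).1.toNat ((s : Int), a).2 else ml
            | none => ml) = ml.set s (min ml[s] a) := by
        simp only [hget]
        by_cases hc : ml[s] > a
        · simp [hc, min_eq_right (le_of_lt hc)]
        · have : min ml[s] a = ml[s] := min_eq_left (by omega)
          simp [hc, this, List.set_getElem_self]
      rw [List.foldl_cons, hstep, hs, ih _ (s+1) (by simp at h ⊢; omega)]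
      apply List.ext_getElem
      · simp
      · intro k hk1 hk2
        simp only [List.getElem_mapIdx, List.getElem_set] at *
        by_cases hks : k = s
        · subst hks; simp
        · have hsk : ¬ (s = k) := fun h => hks h.symm
          simp only [if_neg hsk]
          by_cases hk : s + 1 ≤ k ∧ k < s + 1 + as.length
          · rw [if_pos hk, if_pos (show s ≤ k ∧ k < s + (a :: as).length by simp; omega)]
            have hks' : k - s = (k - (s+1)) + 1 := by omega
            rw [hks', List.getD_cons_succ]
          · rw [if_neg hk, if_neg (show ¬(s ≤ k ∧ k < s + (a :: as).length) by simp; omega)]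

-- A's outer loop: folding the inner loop over the rows computes, at each index k,
-- the running min over the k-th entries of the rows that have one.
lemma outer_spec (rows : List (List Int)) : ∀ (ml : List Int),
    (∀ r ∈ rows, r.length ≤ ml.length) →
    rows.foldl
      (fun ml point_data_pair =>
        (PySem.List.enumerate point_data_pair).foldl
          (fun ml p =>
            match PySem.List.pyGet? ml p.1 with
            | some v => if v > p.2 then ml.set p.1.toNat p.2 else ml
            | none => ml) ml) ml
      = ml.mapIdx (fun k v => (rows.filterMap (fun r => r[k]?)).foldl min v) := by
  induction rows with
  | nil =>
      intro ml _
      simp only [List.foldl_nil, List.filterMap_nil, List.foldl_nil]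
      apply List.ext_getElem <;> simp [List.getElem_mapIdx]
  | cons r rs ih =>
      intro ml h
      rw [List.foldl_cons]
      have hr : r.length ≤ ml.length := h r (by simp)
      have hin := inner_spec r ml 0 (by omega)
      simp only [Nat.cast_zero] at hin
      -- enumerate r = enumerate r 0 (default arg)
      rw [show PySem.List.enumerate r (0:Int) = PySem.List.enumerate r from rfl] at hin
      rw [hin, ih _ (by intro q hq; simp [List.length_mapIdx]; exact h q (by simp [hq]))]
      rw [List.mapIdx_mapIdx]
      apply List.ext_getElem
      · simp
      · intro k hk1 hk2
        simp only [List.getElem_mapIdx, Function.comp]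
        rw [List.filterMap_cons]
        by_cases hk : k < r.length
        · have : r[k]? = some r[k] := List.getElem?_eq_getElem hk
          rw [this]
          rw [if_pos (by omega)]
          simp only [List.foldl_cons]
          congr 1
          · simp [this]
        · have : r[k]? = none := List.getElem?_eq_none (by omega)
          rw [this, if_neg (by omega)]

-- ===== VERDICT (by name: the statement is the Claim_ definition above) =====
theorem get_minimal_data_range_spec : Claim_equal_get_minimal_data_range := by
  intro data_list _ hpre
  obtain ⟨hne, hall⟩ := hpre
  obtain ⟨r0, rest, rfl⟩ : ∃ r0 rest, data_list = r0 :: rest := by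
    cases data_list with
    | nil => exact absurd rfl hne
    | cons a l => exact ⟨a, l, rfl⟩
  unfold Spec_get_minimal_data_range get_minimal_data_range get_minimal_data_range_alt
  have hhead : PySem.List.pyGet? (r0 :: rest) (0 : Int) = some r0 := by
    simp [PySem.List.pyGet?, PySem.List.pyIdx?]
  simp only [hhead, Option.getD_some]
  set n := r0.length with hn
  have hinit :
      (PySem.List.pyRange 0 (n : Int) 1).foldl (fun acc _ => acc ++ [(1000 : Int)]) []
        = List.replicate n (1000 : Int) := by
    rw [PySem.List.foldl_append_singleton_eq_map (fun _ => (1000 : Int))]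
    rw [List.map_const', PySem.List.length_pyRange_one]
    simp
  rw [hinit, outer_spec (r0 :: rest) (List.replicate n 1000)
      (by intro q hq; rw [List.length_replicate]; exact hall q hq)]
  apply List.ext_getElem
  · simp
  · intro k hk1 hk2
    have hkn : k < n := by simpa using hk1
    simp only [List.getElem_mapIdx, List.getElem_replicate, List.getElem_map,
      List.getElem_range]
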